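-- pv_equiv track=rewrite | github.com/mitchysmess/Wallet-Analyzer | wallet_analyzer/addresses.py | _resolve_address_column
-- ===== SOURCE A (Python) =====
-- AUTO_ADDRESS_COLUMNS = ("wallet", "address", "wallet_address", "owner", "solana_wallet")
--
-- def _resolve_address_column(fieldnames: list[str], explicit_column: str | None = None) -> str:
--     if explicit_column:
--         if explicit_column not in fieldnames:
--             raise ValueError(f"address column '{explicit_column}' was not found in the CSV header")
--         return explicit_column
--
--     lowered = {name.strip().lower(): name for name in fieldnames}
--     for candidate in AUTO_ADDRESS_COLUMNS:
--         if candidate in lowered: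
--             return lowered[candidate]
--
--     available = ", ".join(fieldnames)
--     raise ValueError(
--         "could not auto-detect the address column. "
--         f"Use --address-column. Available columns: {available}"
--     )
-- ===== SOURCE B (Python) =====
-- AUTO_ADDRESS_COLUMNS = ("wallet", "address", "wallet_address", "owner", "solana_wallet")
--
-- def _resolve_address_column(fieldnames: list[str], explicit_column: str | None = None) -> str:
--     if explicit_column:
--         if explicit_column not in fieldnames:
--             raise ValueError(f"address column '{explicit_column}' was not found in the CSV header")
--         return explicit_column
--
--     priority = {column: rank for rank, column in enumerate(AUTO_ADDRESS_COLUMNS)}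
--     best = None  # (rank, header) with the lowest rank seen so far
--     for name in fieldnames:
--         rank = priority.get(name.strip().lower())
--         if rank is not None and (best is None or rank <= best[0]):
--             best = (rank, name)
--     if best is not None:
--         return best[1]
--
--     available = ", ".join(fieldnames)
--     raise ValueError(
--         "could not auto-detect the address column. "
--         f"Use --address-column. Available columns: {available}"
--     )
-- ===== Notes on version B (the rewrite author's own statement) =====
-- stated objective: alternative
-- what changed: Replaces the normalized-header dict plus candidate-order lookup loop with a single argmin pass over fieldnames: a candidate->rank table is built once and one scan keeps the header with the lowest rank (ties going to the later header); Pre_ excludes the inputs where A raises ValueError (truthy explicit_column absent from the header, or no header matching any auto candidate).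
import Mathlib
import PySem

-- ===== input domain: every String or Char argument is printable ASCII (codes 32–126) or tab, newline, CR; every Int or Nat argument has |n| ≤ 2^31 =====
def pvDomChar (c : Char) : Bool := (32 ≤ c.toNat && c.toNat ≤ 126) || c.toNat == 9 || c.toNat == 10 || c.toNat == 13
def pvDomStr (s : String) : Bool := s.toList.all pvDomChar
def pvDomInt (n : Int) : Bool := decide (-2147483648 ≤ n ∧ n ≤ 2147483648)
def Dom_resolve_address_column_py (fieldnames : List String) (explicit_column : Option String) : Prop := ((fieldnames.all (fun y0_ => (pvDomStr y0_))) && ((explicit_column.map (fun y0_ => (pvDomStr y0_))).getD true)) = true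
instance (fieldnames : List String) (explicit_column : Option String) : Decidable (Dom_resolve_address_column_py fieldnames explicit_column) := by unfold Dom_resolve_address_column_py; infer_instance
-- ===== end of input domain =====

-- B replaces the normalized-header dict + candidate loop by a single argmin pass over fieldnames
-- with a candidate->rank table; equivalence is about the RETURN value on inputs where A returns
-- (Pre_ excludes the two ValueError paths).

-- name.strip().lower()
def pvNorm (s : String) : String := PySem.Str.lower (PySem.Str.strip s)

def pvAutoCols : List String := ["wallet", "address", "wallet_address", "owner", "solana_wallet"]

-- ===== PORT A =====
-- the 'for candidate in AUTO_ADDRESS_COLUMNS' loop; [] = the final ValueError (excluded by Pre_)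
def pvLoopA (lowered : PySem.Dict String String) : List String → String
  | [] => ""
  | c :: rest =>
    match lowered.get? c with
    | some v => v
    | none => pvLoopA lowered rest

def resolve_address_column_py (fieldnames : List String) (explicit_column : Option String) : String :=
  if explicit_column.getD "" ≠ "" then
    -- raise ValueError if not present (excluded by Pre_); else return explicit_column
    if fieldnames.contains (explicit_column.getD "") then explicit_column.getD "" else ""
  else
    let lowered := fieldnames.foldl (fun d name => d.insert (pvNorm name) name) PySem.Dict.empty
    pvLoopA lowered pvAutoCols

-- ===== PORT B =====
-- priority = {column: rank for rank, column in enumerate(AUTO_ADDRESS_COLUMNS)}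
def pvPrio : PySem.Dict String Int :=
  (PySem.List.enumerate pvAutoCols).foldl (fun d p => d.insert p.2 p.1) PySem.Dict.empty

-- one iteration of 'for name in fieldnames' updating best
def pvStep (best : Option (Int × String)) (name : String) : Option (Int × String) :=
  match pvPrio.get? (pvNorm name), best with
  | none, b => b
  | some r, none => some (r, name)
  | some r, some b => if r ≤ b.1 then some (r, name) else some b

def resolve_address_column_py_alt (fieldnames : List String) (explicit_column : Option String) : String :=
  if explicit_column.getD "" ≠ "" then
    if fieldnames.contains (explicit_column.getD "") then explicit_column.getD "" else ""
  else
    match fieldnames.foldl pvStep none with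
    | some b => b.2
    | none => ""   -- the final ValueError (excluded by Pre_)

-- ===== PRECONDITION & SPEC =====
-- Pre_ excludes exactly the inputs where A raises ValueError: a truthy explicit_column absent from
-- fieldnames, or no explicit_column and no header normalizing to any auto candidate.
def Pre_resolve_address_column_py (fieldnames : List String) (explicit_column : Option String) : Prop :=
  (if explicit_column.getD "" ≠ "" then fieldnames.contains (explicit_column.getD "")
   else pvAutoCols.any (fun c => fieldnames.any (fun n => pvNorm n == c))) = true
instance (fieldnames : List String) (explicit_column : Option String) : Decidable (Pre_resolve_address_column_py fieldnames explicit_column) := by unfold Pre_resolve_address_column_py; infer_instance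
def pvWitness_resolve_address_column_py : List String × Option String := (["Token", " Wallet "], none)

def Spec_resolve_address_column_py (fieldnames : List String) (explicit_column : Option String) (out : String) : Prop := out = resolve_address_column_py_alt fieldnames explicit_column
instance (fieldnames : List String) (explicit_column : Option String) (out : String) : Decidable (Spec_resolve_address_column_py fieldnames explicit_column out) := by unfold Spec_resolve_address_column_py; infer_instance

-- ===== CLAIM (what is proved, stated in full; the proofs are below) =====
def Claim_equal_resolve_address_column_py : Prop := ∀ (fieldnames : List String) (explicit_column : Option String), Dom_resolve_address_column_py fieldnames explicit_column → Pre_resolve_address_column_py fieldnames explicit_column → Spec_resolve_address_column_py fieldnames explicit_column (resolve_address_column_py fieldnames explicit_column)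

-- ===== LEMMAS AND PROOFS =====

-- proof-only: the last header of l normalizing to c
def pvLastMatch (l : List String) (c : String) : Option String :=
  l.foldl (fun chosen name => if pvNorm name == c then some name else chosen) none

-- proof-only: A's answer expressed candidate by candidate via pvLastMatch
def pvSpec (l : List String) : Option (Int × String) :=
  match pvLastMatch l "wallet" with
  | some n => some (0, n)
  | none => match pvLastMatch l "address" with
    | some n => some (1, n)
    | none => match pvLastMatch l "wallet_address" with
      | some n => some (2, n)
      | none => match pvLastMatch l "owner" with
        | some n => some (3, n)
        | none => match pvLastMatch l "solana_wallet" with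
          | some n => some (4, n)
          | none => none

-- the dict built by A's comprehension answers each lookup with the LAST matching header
theorem get?_foldl_insert_norm (l : List String) (d : PySem.Dict String String) (c : String) :
    (l.foldl (fun d name => d.insert (pvNorm name) name) d).get? c
      = l.foldl (fun chosen name => if pvNorm name == c then some name else chosen) (d.get? c) := by
  induction l generalizing d with
  | nil => rfl
  | cons x xs ih =>
    simp only [List.foldl_cons, ih, PySem.Dict.get?_insert]
    by_cases h : pvNorm x = c
    · simp [h]
    · simp [h, Ne.symm h]

theorem loopA_eq_spec (l : List String) :
    pvLoopA (l.foldl (fun d name => d.insert (pvNorm name) name) PySem.Dict.empty) pvAutoCols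
      = (pvSpec l).elim "" Prod.snd := by
  have hg : ∀ c, (l.foldl (fun d name => d.insert (pvNorm name) name) PySem.Dict.empty).get? c
      = pvLastMatch l c := by
    intro c
    rw [get?_foldl_insert_norm l PySem.Dict.empty c, PySem.Dict.get?_empty]
    rfl
  simp only [pvAutoCols, pvLoopA, hg, pvSpec]
  cases pvLastMatch l "wallet" <;> cases pvLastMatch l "address" <;>
    cases pvLastMatch l "wallet_address" <;> cases pvLastMatch l "owner" <;>
    cases pvLastMatch l "solana_wallet" <;> rfl

theorem prio_get (s : String) :
    pvPrio.get? s =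
      if s = "wallet" then some 0 else if s = "address" then some 1
      else if s = "wallet_address" then some 2 else if s = "owner" then some 3
      else if s = "solana_wallet" then some 4 else none := by
  have h : pvPrio = PySem.Dict.mk [("wallet", 0), ("address", 1), ("wallet_address", 2),
      ("owner", 3), ("solana_wallet", 4)] := by decide
  rw [h]
  simp only [PySem.Dict.get?_mk_cons]
  have e : ∀ a : String, (a == s) = decide (s = a) := by
    intro a; by_cases hs : s = a <;> simp [hs, Ne.symm]
  simp only [e]
  split_ifs <;> simp_all <;> rfl

theorem lastMatch_append (l : List String) (x c : String) :
    pvLastMatch (l ++ [x]) c = if pvNorm x = c then some x else pvLastMatch l c := by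
  simp [pvLastMatch, List.foldl_append]

theorem step_spec (l : List String) (x : String) :
    pvStep (pvSpec l) x = pvSpec (l ++ [x]) := by
  by_cases h0 : pvNorm x = "wallet"
  · have hr : pvPrio.get? (pvNorm x) = some 0 := by
      rw [prio_get]; simp [h0]
    rw [pvStep.eq_def, hr]
    simp only [pvSpec, lastMatch_append, h0, reduceIte]
    cases pvLastMatch l "wallet" <;> cases pvLastMatch l "address" <;>
      cases pvLastMatch l "wallet_address" <;> cases pvLastMatch l "owner" <;>
      cases pvLastMatch l "solana_wallet" <;> simp
  · by_cases h1 : pvNorm x = "address"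
    · have hr : pvPrio.get? (pvNorm x) = some 1 := by
        rw [prio_get]; simp [h0, h1]
      rw [pvStep.eq_def, hr]
      simp only [pvSpec, lastMatch_append, h0, h1, reduceIte]
      cases pvLastMatch l "wallet" <;> cases pvLastMatch l "address" <;>
        cases pvLastMatch l "wallet_address" <;> cases pvLastMatch l "owner" <;>
        cases pvLastMatch l "solana_wallet" <;> simp
    · by_cases h2 : pvNorm x = "wallet_address"
      · have hr : pvPrio.get? (pvNorm x) = some 2 := by
          rw [prio_get]; simp [h0, h1, h2]
        rw [pvStep.eq_def, hr]
        simp only [pvSpec, lastMatch_append, h0, h1, h2, reduceIte]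
        cases pvLastMatch l "wallet" <;> cases pvLastMatch l "address" <;>
          cases pvLastMatch l "wallet_address" <;> cases pvLastMatch l "owner" <;>
          cases pvLastMatch l "solana_wallet" <;> simp
      · by_cases h3 : pvNorm x = "owner"
        · have hr : pvPrio.get? (pvNorm x) = some 3 := by
            rw [prio_get]; simp [h0, h1, h2, h3]
          rw [pvStep.eq_def, hr]
          simp only [pvSpec, lastMatch_append, h0, h1, h2, h3, reduceIte]
          cases pvLastMatch l "wallet" <;> cases pvLastMatch l "address" <;>
            cases pvLastMatch l "wallet_address" <;> cases pvLastMatch l "owner" <;>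
            cases pvLastMatch l "solana_wallet" <;> simp
        · by_cases h4 : pvNorm x = "solana_wallet"
          · have hr : pvPrio.get? (pvNorm x) = some 4 := by
              rw [prio_get]; simp [h0, h1, h2, h3, h4]
            rw [pvStep.eq_def, hr]
            simp only [pvSpec, lastMatch_append, h0, h1, h2, h3, h4, reduceIte]
            cases pvLastMatch l "wallet" <;> cases pvLastMatch l "address" <;>
              cases pvLastMatch l "wallet_address" <;> cases pvLastMatch l "owner" <;>
              cases pvLastMatch l "solana_wallet" <;> simp
          · have hr : pvPrio.get? (pvNorm x) = none := by
              rw [prio_get]; simp [h0, h1, h2, h3, h4]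
            rw [pvStep.eq_def, hr]
            simp only [pvSpec, lastMatch_append, h0, h1, h2, h3, h4, reduceIte]

theorem foldl_step_eq_spec (l : List String) : l.foldl pvStep none = pvSpec l := by
  induction l using List.reverseRecOn with
  | nil => rfl
  | append_singleton l x ih => rw [List.foldl_append, List.foldl_cons, List.foldl_nil, ih, step_spec]

-- ===== VERDICT (by name: the statement is the Claim_ definition above) =====
theorem resolve_address_column_py_spec : Claim_equal_resolve_address_column_py := by
  intro fieldnames explicit_column _ _
  show resolve_address_column_py fieldnames explicit_column
      = resolve_address_column_py_alt fieldnames explicit_column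
  unfold resolve_address_column_py resolve_address_column_py_alt
  by_cases h : explicit_column.getD "" ≠ ""
  · simp only [if_pos h]
  · simp only [if_neg h]
    rw [foldl_step_eq_spec, loopA_eq_spec]
    cases pvSpec fieldnames <;> rfl
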